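-- pv_equiv track=rewrite | github.com/jyuwaaw/Low_Power_Accelerator_Design_based_on_Neural_Network_Error_Resilience | src/Reorder Algorithm/Flow_backup_May8th_2023/2_IndicesReorder.py | calculate_bit_jumps
-- ===== SOURCE A (Python) =====
-- from typing import List, Tuple
--
-- def calculate_bit_jumps(binary_nums: List[str]) -> List[Tuple[int, int, int]]:
--     # Calculate the bit jump count between each pair of binary numbers
--     jumps = set()
--     for i in range(len(binary_nums)):
--         for j in range(i+1, len(binary_nums)):
--             jump_count = sum([1 for x, y in zip(binary_nums[i], binary_nums[j]) if x != y])
--             jumps.add((i, j, jump_count))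
--             jumps.add((j, i, jump_count))
--     return list(jumps)
-- ===== SOURCE B (Python) =====
-- def calculate_bit_jumps(binary_nums):
--     # Column-wise: seed a counter for every i<j pair, then sweep bit positions,
--     # incrementing the pairs that mismatch in that column.
--     n = len(binary_nums)
--     counts = {}
--     for i in range(n):
--         for j in range(i + 1, n):
--             counts[(i, j)] = 0
--     maxlen = max([len(s) for s in binary_nums], default=0)
--     for p in range(maxlen):
--         col = [(i, s[p]) for i, s in enumerate(binary_nums) if len(s) > p]
--         rest = col
--         while rest:
--             (i, ci), rest = rest[0], rest[1:]
--             for (j, cj) in rest: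
--                 if ci != cj:
--                     counts[(i, j)] += 1
--     jumps = set()
--     for (i, j), c in counts.items():
--         jumps.add((i, j, c))
--         jumps.add((j, i, c))
--     return list(jumps)
-- ===== Notes on version B (the rewrite author's own statement) =====
-- stated objective: alternative
-- what changed: Replaces the pair-by-pair zip scan with a column sweep: all i<j counters are seeded to 0 in a dict, then each bit position increments the counters of the pairs whose characters differ there, and the (i,j,c)/(j,i,c) set is built from the dict at the end.
import Mathlib
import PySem

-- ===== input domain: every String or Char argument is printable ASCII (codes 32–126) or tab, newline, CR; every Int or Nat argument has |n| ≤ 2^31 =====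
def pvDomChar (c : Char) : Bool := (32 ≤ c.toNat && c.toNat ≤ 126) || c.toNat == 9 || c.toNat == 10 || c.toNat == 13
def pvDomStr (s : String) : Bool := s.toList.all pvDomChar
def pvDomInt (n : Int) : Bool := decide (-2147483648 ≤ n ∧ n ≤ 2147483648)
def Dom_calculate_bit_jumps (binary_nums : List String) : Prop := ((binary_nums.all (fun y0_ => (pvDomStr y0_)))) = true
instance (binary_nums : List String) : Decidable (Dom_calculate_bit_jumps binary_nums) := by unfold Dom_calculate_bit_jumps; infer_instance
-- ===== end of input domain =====

-- ===== PORT A =====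
def calculate_bit_jumps (binary_nums : List String) : List (Int × Int × Int) :=
  (PySem.List.pyRange 0 (binary_nums.length : Int)).foldl (fun jumps i =>
    (PySem.List.pyRange (i + 1) (binary_nums.length : Int)).foldl (fun jumps j =>
      let jump_count : Int :=
        ((((PySem.List.pyGetD binary_nums i "").toList.zip
            (PySem.List.pyGetD binary_nums j "").toList).filter
          (fun xy => xy.1 ≠ xy.2)).map (fun _ => (1 : Int))).sum
      PySem.Set.add (PySem.Set.add jumps (i, j, jump_count)) (j, i, jump_count))
    jumps) PySem.Set.empty

-- ===== PORT B =====
-- B sweeps bit positions (columns): seed a 0 counter for every i<j pair in a dict, then each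
-- position increments the counters of the pairs whose characters at that position differ.
def pvColLoop (col : List (Int × Char)) (counts : PySem.Dict (Int × Int) Int) :
    PySem.Dict (Int × Int) Int :=
  match col with
  | [] => counts
  | (i, ci) :: rest =>
      pvColLoop rest
        (rest.foldl (fun d jc => if ci ≠ jc.2 then d.modify (i, jc.1) 0 (· + 1) else d) counts)

def calculate_bit_jumps_alt (binary_nums : List String) : List (Int × Int × Int) :=
  let n : Int := binary_nums.length
  let counts0 : PySem.Dict (Int × Int) Int :=
    (PySem.List.pyRange 0 n).foldl (fun d i =>
      (PySem.List.pyRange (i + 1) n).foldl (fun d j => d.insert (i, j) 0) d) PySem.Dict.empty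
  let maxlen : Int := PySem.List.maxD (binary_nums.map (fun s => PySem.Str.len s)) (fun x => x) 0
  let counts1 :=
    (PySem.List.pyRange 0 maxlen).foldl (fun counts p =>
      let col := (PySem.List.enumerate binary_nums).filterMap (fun is =>
        if p < PySem.Str.len is.2 then some (is.1, (PySem.Str.pyGet? is.2 p).getD ' ') else none)
      pvColLoop col counts) counts0
  counts1.items.foldl (fun jumps kv =>
    PySem.Set.add (PySem.Set.add jumps (kv.1.1, kv.1.2, kv.2)) (kv.1.2, kv.1.1, kv.2))
    PySem.Set.empty

-- ===== PRECONDITION & SPEC =====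
def Spec_calculate_bit_jumps (binary_nums : List String) (out : List (Int × Int × Int)) : Prop := out = calculate_bit_jumps_alt binary_nums
instance (binary_nums : List String) (out : List (Int × Int × Int)) : Decidable (Spec_calculate_bit_jumps binary_nums out) := by unfold Spec_calculate_bit_jumps; infer_instance

-- ===== CLAIM (what is proved, stated in full; the proofs are below) =====
def Claim_equal_calculate_bit_jumps : Prop := ∀ (binary_nums : List String), Dom_calculate_bit_jumps binary_nums → Spec_calculate_bit_jumps binary_nums (calculate_bit_jumps binary_nums)

-- ===== LEMMAS AND PROOFS =====

-- the i<j index pairs, in the iteration order shared by A's loops and B's dict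
lemma pvRange_one_eq (a b : Int) :
    PySem.List.pyRange a b = (List.range (b - a).toNat).map (fun k => a + (k : Nat)) := by
  simp only [PySem.List.pyRange]
  norm_num
  by_cases h : a < b
  · simp [h]
  · simp [h, Int.toNat_of_nonpos (by omega : b - a ≤ 0)]
def pvKL (n : Nat) : List (Int × Int) :=
  (List.range n).flatMap (fun i =>
    (List.range (n - (i + 1))).map (fun k => ((i : Int), (i : Int) + 1 + (k : Nat))))
lemma pvNested_eq_KL {β : Type} (n : Nat) (g : β → (Int × Int) → β) (init : β) :
    (PySem.List.pyRange 0 (n : Int)).foldl (fun acc i =>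
      (PySem.List.pyRange (i + 1) (n : Int)).foldl (fun acc j => g acc (i, j)) acc) init
    = (pvKL n).foldl g init := by
  rw [PySem.List.pyRange_zero_natCast, List.foldl_map, pvKL, List.foldl_flatMap]
  apply PySem.List.foldl_congr_mem
  intro acc i hi
  rw [List.foldl_map, pvRange_one_eq]
  have : ((n : Int) - ((i : Int) + 1)).toNat = n - (i + 1) := by omega
  rw [this, List.foldl_map]

lemma pvKL_mem {n : Nat} {x : Int × Int} :
    x ∈ pvKL n ↔ ∃ a b : Nat, a < b ∧ b < n ∧ x = ((a : Int), (b : Int)) := by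
  simp only [pvKL, List.mem_flatMap, List.mem_map, List.mem_range]
  constructor
  · rintro ⟨i, hi, k, hk, rfl⟩
    exact ⟨i, i + 1 + k, by omega, by omega, by push_cast; ring_nf⟩
  · rintro ⟨a, b, hab, hbn, rfl⟩
    refine ⟨a, by omega, b - (a + 1), by omega, ?_⟩
    have : ((b - (a + 1) : Nat) : Int) = (b : Int) - (a : Int) - 1 := by omega
    rw [this]; ring_nf

lemma pvKL_nodup (n : Nat) : (pvKL n).Nodup := by
  apply List.nodup_flatMap.mpr
  constructor
  · intro i _
    exact (List.nodup_range).map (fun x y h => by simpa using (by omega : ((x:Int)) = y → x = y) (by simpa using congrArg Prod.snd h))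
  · apply List.Pairwise.imp ?_ (List.pairwise_lt_range (n := n))
    intro a b hab
    intro x hx hy
    simp only [List.mem_map, List.mem_range] at hx hy
    obtain ⟨k, _, rfl⟩ := hx
    obtain ⟨k', _, h⟩ := hy
    have := congrArg Prod.fst h
    simp at this; omega

-- the contribution one column makes to the counter of key k
def pvColCount : List (Int × Char) → (Int × Int) → Int
  | [], _ => 0
  | (i, ci) :: rest, k =>
      ((rest.countP (fun jc => decide ((i, jc.1) = k) && decide (ci ≠ jc.2)) : Nat) : Int) +
        pvColCount rest k

lemma pvInner_getD (i : Int) (ci : Char) (rest : List (Int × Char))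
    (d : PySem.Dict (Int × Int) Int) (k : Int × Int) :
    (rest.foldl (fun d jc => if ci ≠ jc.2 then d.modify (i, jc.1) 0 (· + 1) else d) d).getD k 0
    = d.getD k 0 + ((rest.countP (fun jc => decide ((i, jc.1) = k) && decide (ci ≠ jc.2)) : Nat) : Int) := by
  induction rest generalizing d with
  | nil => simp
  | cons jc rest ih =>
    rw [List.foldl_cons, ih, List.countP_cons]
    by_cases h1 : ci ≠ jc.2 <;> by_cases h2 : k = (i, jc.1) <;>
      simp [h1, h2, PySem.Dict.getD_modify, eq_comm] <;> push_cast <;> ring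

lemma pvColLoop_getD (col : List (Int × Char)) (d : PySem.Dict (Int × Int) Int) (k : Int × Int) :
    (pvColLoop col d).getD k 0 = d.getD k 0 + pvColCount col k := by
  induction col generalizing d with
  | nil => simp [pvColLoop, pvColCount]
  | cons x rest ih =>
    obtain ⟨i, ci⟩ := x
    rw [pvColLoop, ih, pvInner_getD, pvColCount]
    ring

lemma pvInner_keys (i : Int) (ci : Char) (rest : List (Int × Char))
    (d : PySem.Dict (Int × Int) Int) (h : ∀ jc ∈ rest, (i, jc.1) ∈ d.keys) :
    (rest.foldl (fun d jc => if ci ≠ jc.2 then d.modify (i, jc.1) 0 (· + 1) else d) d).keys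
    = d.keys := by
  induction rest generalizing d with
  | nil => rfl
  | cons jc rest ih =>
    rw [List.foldl_cons]
    by_cases h1 : ci ≠ jc.2
    · have hk : (d.modify (i, jc.1) 0 (· + 1)).keys = d.keys := by
        rw [PySem.Dict.keys_modify, PySem.Dict.keys_insert_of_contains]
        exact (PySem.Dict.contains_iff_mem_keys _ _).mpr (h jc (by simp))
      simp only [if_pos h1]
      rw [ih _ (fun x hx => by rw [hk]; exact h x (by simp [hx])), hk]
    · simp only [if_neg h1]
      exact ih _ (fun x hx => h x (by simp [hx]))

lemma pvColLoop_keys (col : List (Int × Char)) (d : PySem.Dict (Int × Int) Int)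
    (h : col.Pairwise (fun x y => (x.1, y.1) ∈ d.keys)) :
    (pvColLoop col d).keys = d.keys := by
  induction col generalizing d with
  | nil => rfl
  | cons x rest ih =>
    obtain ⟨i, ci⟩ := x
    rw [List.pairwise_cons] at h
    rw [pvColLoop]
    have hk := pvInner_keys i ci rest d (fun jc hjc => h.1 jc hjc)
    rw [ih _ (by simpa only [hk] using h.2), hk]

lemma pvCountP_nodup {t : List Nat} (hnd : t.Nodup) (b : Nat) (q : Nat → Bool) :
    t.countP (fun i => decide (i = b) && q i) = if b ∈ t ∧ q b then 1 else 0 := by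
  induction t with
  | nil => simp
  | cons x t ih =>
    rw [List.nodup_cons] at hnd
    rw [List.countP_cons, ih hnd.2]
    by_cases hx : x = b
    · subst hx
      by_cases hq : q x <;> simp [hq, hnd.1]
    · simp [hx, Ne.symm hx]

lemma pvColCount_zero (l : List Nat) (ch : Nat → Char) (a : Nat) (y : Int)
    (ha : a ∉ l) :
    pvColCount (l.map (fun (i : Nat) => ((i : Int), ch i))) ((a : Int), y) = 0 := by
  induction l with
  | nil => rfl
  | cons x l ih =>
    have hxa : x ≠ a := fun h => ha (by simp [h])
    simp only [List.map_cons, pvColCount, List.countP_map]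
    rw [ih (fun h => ha (List.mem_cons_of_mem _ h))]
    have hz : l.countP ((fun jc => decide (((x : Int), jc.1) = ((a : Int), y)) && decide (ch x ≠ jc.2)) ∘ (fun (i : Nat) => ((i : Int), ch i))) = 0 := by
      apply List.countP_eq_zero.mpr
      intro jc _
      simp [Prod.ext_iff, Int.natCast_inj, hxa]
    rw [hz]; simp

lemma pvColCount_map (l : List Nat) (h : l.Pairwise (· < ·)) (ch : Nat → Char)
    (a b : Nat) (hab : a < b) :
    pvColCount (l.map (fun (i : Nat) => ((i : Int), ch i))) ((a : Int), (b : Int))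
    = if a ∈ l ∧ b ∈ l ∧ ch a ≠ ch b then 1 else 0 := by
  induction l with
  | nil => simp [pvColCount]
  | cons x l ih =>
    rw [List.pairwise_cons] at h
    have hnd : l.Nodup := h.2.nodup
    simp only [List.map_cons, pvColCount, List.countP_map]
    by_cases hx : x = a
    · subst hx
      have hal : x ∉ l := fun hm => lt_irrefl x (h.1 x hm)
      rw [pvColCount_zero l ch x _ hal]
      have hpe : ((fun jc => decide (((x : Int), jc.1) = ((x : Int), (b : Int))) && decide (ch x ≠ jc.2)) ∘ (fun (i : Nat) => ((i : Int), ch i)))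
           = (fun i => decide (i = b) && decide (ch x ≠ ch i)) := by
        funext jc; simp [Prod.ext_iff]
      rw [hpe, pvCountP_nodup hnd b (fun jc => decide (ch x ≠ ch jc))]
      have hba : b ≠ x := Nat.ne_of_gt hab
      by_cases hb : b ∈ l <;> by_cases hc : ch x ≠ ch b <;> simp [hb, hc, hal, hba]
    · have hz : l.countP ((fun jc => decide (((x : Int), jc.1) = ((a : Int), (b : Int))) && decide (ch x ≠ jc.2)) ∘ (fun (i : Nat) => ((i : Int), ch i))) = 0 := by
        apply List.countP_eq_zero.mpr
        intro jc _
        simp [Prod.ext_iff, Int.natCast_inj, hx]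
      rw [hz]
      by_cases hxb : x = b
      · subst hxb
        have hal : a ∉ l := by
          intro hm
          exact absurd (h.1 a hm) (by omega)
        rw [pvColCount_zero l ch a _ hal]
        simp [hal, hx, Ne.symm hx]
      · rw [ih h.2]
        simp [hx, Ne.symm hx, hxb, Ne.symm hxb]

lemma pvEnumerate_cons {α : Type} (x : α) (xs : List α) (off : Int) :
    PySem.List.enumerate (x :: xs) off = (off, x) :: PySem.List.enumerate xs (off + 1) := rfl
lemma pvCol_eq (bn : List String) (off : Int) (p : Int) :
    (PySem.List.enumerate bn off).filterMap (fun is =>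
      if p < PySem.Str.len is.2 then some (is.1, (PySem.Str.pyGet? is.2 p).getD ' ') else none)
    = ((List.range bn.length).filter (fun i => decide (p < PySem.Str.len (bn.getD i "")))).map
        (fun (i : Nat) => (off + (i : Int), (PySem.Str.pyGet? (bn.getD i "") p).getD ' ')) := by
  induction bn generalizing off with
  | nil => rfl
  | cons s t ih =>
    simp only [pvEnumerate_cons, List.filterMap_cons, ih (off + 1), List.length_cons,
      List.range_succ_eq_map, List.filter_cons, List.getD_cons_zero, List.filter_map,
      List.map_map]
    have hfil : List.filter ((fun i => decide (p < PySem.Str.len ((s :: t).getD i ""))) ∘ Nat.succ) (List.range t.length)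
        = List.filter (fun i => decide (p < PySem.Str.len (t.getD i ""))) (List.range t.length) :=
      List.filter_congr (fun i _ => by simp)
    have hmap : ∀ c : Int, List.map ((fun (i : Nat) => (c + (i : Int), (PySem.Str.pyGet? ((s :: t).getD i "") p).getD ' ')) ∘ Nat.succ)
          (List.filter (fun i => decide (p < PySem.Str.len (t.getD i ""))) (List.range t.length))
        = List.map (fun (i : Nat) => (c + 1 + (i : Int), (PySem.Str.pyGet? (t.getD i "") p).getD ' '))
          (List.filter (fun i => decide (p < PySem.Str.len (t.getD i ""))) (List.range t.length)) := by
      intro c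
      apply List.map_congr_left
      intro i _
      simp only [Function.comp_apply, List.getD_cons_succ, Prod.mk.injEq]
      exact ⟨by push_cast; ring, trivial⟩
    by_cases hc : p < PySem.Str.len s
    · simp only [hc, decide_true, if_true, List.map_cons, List.map_map, hfil, hmap off, Prod.mk.injEq]
      simp
    · simp only [hc, decide_false, Bool.false_eq_true, if_false, List.map_map, hfil, hmap off]

lemma pvHam_sum (s t : List Char) (m : Nat) (hm : min s.length t.length ≤ m) :
    ((List.range m).map (fun q =>
        if q < s.length ∧ q < t.length ∧ s.getD q ' ' ≠ t.getD q ' ' then (1 : Int) else 0)).sum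
    = (((s.zip t).filter (fun xy => xy.1 ≠ xy.2)).map (fun _ => (1 : Int))).sum := by
  induction s generalizing t m with
  | nil => simp
  | cons x s ih =>
    cases t with
    | nil => simp
    | cons y t =>
      cases m with
      | zero => simp at hm
      | succ m' =>
        rw [List.range_succ_eq_map, List.map_cons, List.map_map, List.sum_cons]
        have h0 : (if 0 < (x :: s).length ∧ 0 < (y :: t).length ∧
            (x :: s).getD 0 ' ' ≠ (y :: t).getD 0 ' ' then (1 : Int) else 0)
            = if x ≠ y then (1 : Int) else 0 := by simp
        have hrec : ((List.range m').map ((fun q =>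
            if q < (x :: s).length ∧ q < (y :: t).length ∧
              (x :: s).getD q ' ' ≠ (y :: t).getD q ' ' then (1 : Int) else 0) ∘ Nat.succ)).sum
            = ((List.range m').map (fun q =>
            if q < s.length ∧ q < t.length ∧ s.getD q ' ' ≠ t.getD q ' ' then (1 : Int) else 0)).sum := by
          apply congrArg
          apply List.map_congr_left
          intro q _
          simp [Nat.succ_lt_succ_iff]
        rw [h0, hrec, ih t m' (by simp at hm ⊢; omega)]
        rw [List.zip_cons_cons, List.filter_cons]
        by_cases hxy : x ≠ y <;> simp [hxy]
    
lemma pvMax?_some {α κ : Type} [LinearOrder κ] (x : α) (xs : List α) (key : α → κ) :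
    ∃ m, PySem.List.max? (x :: xs) key = some m ∧ m ∈ x :: xs := by
  suffices h : ∀ (l : List α) (a : α), ∃ m, List.foldl (fun acc x =>
      match acc with
      | none => some x
      | some mm => if key mm < key x then some x else some mm) (some a) l = some m ∧ (m = a ∨ m ∈ l) by
    obtain ⟨m, hm, hmem⟩ := h xs x
    exact ⟨m, by simpa [PySem.List.max?] using hm, by rcases hmem with h | h <;> simp [h]⟩
  intro l
  induction l with
  | nil => exact fun a => ⟨a, rfl, Or.inl rfl⟩
  | cons b l ih =>
    intro a
    rw [List.foldl_cons]
    by_cases hc : key a < key b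
    · obtain ⟨m, hm, hmem⟩ := ih b
      exact ⟨m, by simpa [hc] using hm, by rcases hmem with h | h <;> simp [h]⟩
    · obtain ⟨m, hm, hmem⟩ := ih a
      exact ⟨m, by simpa [hc] using hm, by rcases hmem with h | h <;> simp [h]⟩

lemma pvMaxD_ge (xs : List Int) : ∀ x ∈ xs, x ≤ PySem.List.maxD xs (fun x => x) 0 := by
  intro x hx
  cases xs with
  | nil => simp at hx
  | cons a l =>
    obtain ⟨m, hm, _⟩ := pvMax?_some a l (fun x => x)
    rw [PySem.List.maxD, hm]
    exact PySem.List.max?_isMax hm x hx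

lemma pvMaxD_nonneg (xs : List Int) (h : ∀ x ∈ xs, 0 ≤ x) :
    0 ≤ PySem.List.maxD xs (fun x => x) 0 := by
  cases xs with
  | nil => simp [PySem.List.maxD, PySem.List.max?]
  | cons a l =>
    obtain ⟨m, hm, hmem⟩ := pvMax?_some a l (fun x => x)
    rw [PySem.List.maxD, hm]
    exact h m hmem

lemma pvPosFold_keys (L : List Int) (colF : Int → List (Int × Char))
    (d : PySem.Dict (Int × Int) Int)
    (h : ∀ p ∈ L, (colF p).Pairwise (fun x y => (x.1, y.1) ∈ d.keys)) :
    (L.foldl (fun c p => pvColLoop (colF p) c) d).keys = d.keys := by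
  induction L generalizing d with
  | nil => rfl
  | cons p L ih =>
    rw [List.foldl_cons]
    have hk := pvColLoop_keys (colF p) d (h p (by simp))
    rw [ih _ (fun q hq => by rw [hk]; exact h q (by simp [hq])), hk]

lemma pvPosFold_getD (L : List Int) (colF : Int → List (Int × Char))
    (d : PySem.Dict (Int × Int) Int) (k : Int × Int) :
    (L.foldl (fun c p => pvColLoop (colF p) c) d).getD k 0
    = d.getD k 0 + (L.map (fun p => pvColCount (colF p) k)).sum := by
  induction L generalizing d with
  | nil => simp
  | cons p L ih =>
    rw [List.foldl_cons, ih, pvColLoop_getD, List.map_cons, List.sum_cons]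
    ring

lemma pvAB_eq (bn : List String) : calculate_bit_jumps bn = calculate_bit_jumps_alt bn := by
  classical
  set n := bn.length with hn
  -- A's per-pair value, as a function of the key
  set ham : (Int × Int) → Int := fun k =>
    ((((PySem.List.pyGetD bn k.1 "").toList.zip
        (PySem.List.pyGetD bn k.2 "").toList).filter
      (fun xy => xy.1 ≠ xy.2)).map (fun _ => (1 : Int))).sum with hham
  set g : List (Int × Int × Int) → (Int × Int) → List (Int × Int × Int) := fun jumps k =>
    PySem.Set.add (PySem.Set.add jumps (k.1, k.2, ham k)) (k.2, k.1, ham k) with hg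
  have hA : calculate_bit_jumps bn = (pvKL n).foldl g PySem.Set.empty := by
    unfold calculate_bit_jumps
    exact pvNested_eq_KL n g PySem.Set.empty
  -- seed dict
  set seed : PySem.Dict (Int × Int) Int :=
    (PySem.List.pyRange 0 (n : Int)).foldl (fun d i =>
      (PySem.List.pyRange (i + 1) (n : Int)).foldl (fun d j => d.insert (i, j) 0) d)
      PySem.Dict.empty with hseeddef
  have hseed : seed = (pvKL n).foldl
      (fun (d : PySem.Dict (Int × Int) Int) k => d.insert k (0 : Int)) PySem.Dict.empty := by
    rw [hseeddef]
    exact pvNested_eq_KL n (fun (d : PySem.Dict (Int × Int) Int) k => d.insert k (0 : Int))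
      PySem.Dict.empty
  have hseedItems : seed.items = (pvKL n).map (fun k => (k, (0 : Int))) := by
    rw [hseed]
    have := PySem.Dict.items_foldl_insert_fresh (pvKL n) (fun a => a) (fun _ => (0 : Int))
      PySem.Dict.empty (fun a _ => PySem.Dict.contains_empty a)
      (by simpa using pvKL_nodup n)
    simpa using this
  have hseedKeys : seed.keys = pvKL n := by
    simp only [PySem.Dict.keys, hseedItems, List.map_map]
    rw [show ((fun (x : (Int × Int) × Int) => x.1) ∘ fun k => (k, (0 : Int))) = id from rfl,
      List.map_id]
  -- maxlen
  set maxlen : Int := PySem.List.maxD (bn.map (fun s => PySem.Str.len s)) (fun x => x) 0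
    with hmax
  have hmax0 : 0 ≤ maxlen := by
    apply pvMaxD_nonneg
    intro x hx
    simp only [List.mem_map] at hx
    obtain ⟨s, _, rfl⟩ := hx
    simp [PySem.Str.len]
  set M : Nat := maxlen.toNat with hM
  have hMeq : (M : Int) = maxlen := Int.toNat_of_nonneg hmax0
  have hlen_le : ∀ i : Nat, i < n → (bn.getD i "").toList.length ≤ M := by
    intro i hi
    have hmem : PySem.Str.len (bn.getD i "") ∈ bn.map (fun s => PySem.Str.len s) := by
      apply List.mem_map.mpr
      refine ⟨bn.getD i "", ?_, rfl⟩
      rw [List.getD_eq_getElem?_getD, List.getElem?_eq_getElem hi]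
      exact List.getElem_mem hi
    have := pvMaxD_ge _ _ hmem
    rw [← hmax] at this
    simp only [PySem.Str.len] at this
    omega
  -- the column at position p
  set colF : Int → List (Int × Char) := fun p =>
    (PySem.List.enumerate bn).filterMap (fun is =>
      if p < PySem.Str.len is.2 then some (is.1, (PySem.Str.pyGet? is.2 p).getD ' ') else none)
    with hcolF
  have hcol : ∀ p : Int, colF p
      = ((List.range n).filter (fun i => decide (p < PySem.Str.len (bn.getD i "")))).map
          (fun (i : Nat) => ((i : Int), (PySem.Str.pyGet? (bn.getD i "") p).getD ' ')) := by
    intro p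
    rw [hcolF]
    show (PySem.List.enumerate bn 0).filterMap _ = _
    rw [pvCol_eq bn 0 p]
    apply List.map_congr_left
    intro i _
    simp
  have hfilpw : ∀ p : Int,
      ((List.range n).filter (fun i => decide (p < PySem.Str.len (bn.getD i "")))).Pairwise (· < ·) :=
    fun p => List.pairwise_lt_range.filter _
  have hcolpw : ∀ p : Int, (colF p).Pairwise (fun x y => (x.1, y.1) ∈ seed.keys) := by
    intro p
    rw [hcol p, List.pairwise_map]
    refine List.Pairwise.imp_of_mem ?_ (hfilpw p)
    intro a b _ hb hab
    have hbn' : b < n := List.mem_range.mp (List.mem_filter.mp hb).1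
    rw [hseedKeys]
    exact pvKL_mem.mpr ⟨a, b, hab, hbn', rfl⟩
  -- counts after both phases
  set counts1 : PySem.Dict (Int × Int) Int :=
    (PySem.List.pyRange 0 maxlen).foldl (fun c p => pvColLoop (colF p) c) seed with hc1
  have hkeys1 : counts1.keys = pvKL n := by
    rw [hc1, pvPosFold_keys _ _ _ (fun p _ => hcolpw p), hseedKeys]
  -- per-key value
  have hval : ∀ a b : Nat, a < b → b < n →
      counts1.getD ((a : Int), (b : Int)) 0 = ham ((a : Int), (b : Int)) := by
    intro a b hab hbn'
    have hkmem : ((a : Int), (b : Int)) ∈ pvKL n := pvKL_mem.mpr ⟨a, b, hab, hbn', rfl⟩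
    have hseedval : seed.getD ((a : Int), (b : Int)) 0 = 0 := by
      apply PySem.Dict.getD_of_mem_items
      · rw [hseedItems]
        exact List.mem_map.mpr ⟨_, hkmem, rfl⟩
      · rw [hseedKeys]; exact pvKL_nodup n
    rw [hc1, pvPosFold_getD, hseedval, zero_add]
    -- positions as naturals
    have hrange : PySem.List.pyRange 0 maxlen = (List.range M).map (fun q => ((q : Nat) : Int)) := by
      rw [← hMeq, PySem.List.pyRange_zero_natCast]
    rw [hrange, List.map_map]
    have hterm : ∀ q : Nat,
        pvColCount (colF (q : Int)) ((a : Int), (b : Int))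
        = if q < (bn.getD a "").toList.length ∧ q < (bn.getD b "").toList.length ∧
            (bn.getD a "").toList.getD q ' ' ≠ (bn.getD b "").toList.getD q ' ' then (1 : Int) else 0 := by
      intro q
      rw [hcol, pvColCount_map _ (hfilpw _) _ a b hab]
      have hch : ∀ i : Nat,
          (PySem.Str.pyGet? (bn.getD i "") ((q : Nat) : Int)).getD ' '
          = (bn.getD i "").toList.getD q ' ' := by
        intro i
        rw [show PySem.Str.pyGet? (bn.getD i "") ((q : Nat) : Int)
            = PySem.List.pyGet? (bn.getD i "").toList ((q : Nat) : Int) from rfl,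
          PySem.List.pyGet?_natCast]
        exact (List.getD_eq_getElem?_getD).symm
      have han : a < n := lt_trans hab hbn'
      refine if_congr ?_ rfl rfl
      simp only [List.mem_filter, List.mem_range, PySem.Str.len, decide_eq_true_eq, hch]
      constructor
      · rintro ⟨⟨_, h1⟩, ⟨_, h2⟩, h3⟩
        exact ⟨by omega, by omega, h3⟩
      · rintro ⟨h1, h2, h3⟩
        exact ⟨⟨han, by omega⟩, ⟨hbn', by omega⟩, h3⟩
    have hmc : ((List.range M).map ((fun p => pvColCount (colF p) ((a : Int), (b : Int))) ∘
        fun q : Nat => ((q : Nat) : Int)))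
        = (List.range M).map (fun q =>
          if q < (bn.getD a "").toList.length ∧ q < (bn.getD b "").toList.length ∧
            (bn.getD a "").toList.getD q ' ' ≠ (bn.getD b "").toList.getD q ' '
          then (1 : Int) else 0) :=
      List.map_congr_left (fun q _ => hterm q)
    rw [hmc, pvHam_sum _ _ M (by
      have := hlen_le a (lt_trans hab hbn')
      omega)]
    rw [hham]
    simp only [PySem.List.pyGetD_natCast]
  -- final items and fold
  have hitems1 : counts1.items = (pvKL n).map (fun k => (k, counts1.getD k 0)) := by
    rw [PySem.Dict.items_eq_map_keys counts1 (by rw [hkeys1]; exact pvKL_nodup n) 0, hkeys1]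
  have hB : calculate_bit_jumps_alt bn = (pvKL n).foldl g PySem.Set.empty := by
    show (counts1.items.foldl (fun jumps kv =>
      PySem.Set.add (PySem.Set.add jumps (kv.1.1, kv.1.2, kv.2)) (kv.1.2, kv.1.1, kv.2))
      PySem.Set.empty) = _
    rw [hitems1, List.foldl_map]
    apply PySem.List.foldl_congr_mem
    intro acc k hk
    obtain ⟨a, b, hab, hbn', rfl⟩ := pvKL_mem.mp hk
    rw [hg]
    simp only []
    rw [hval a b hab hbn']
  rw [hA, hB]

-- ===== VERDICT (by name: the statement is the Claim_ definition above) =====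
theorem calculate_bit_jumps_spec : Claim_equal_calculate_bit_jumps := by
  intro binary_nums _
  unfold Spec_calculate_bit_jumps
  exact pvAB_eq binary_nums
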